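-- pv_equiv track=rewrite | github.com/noodnik2/challenge20 | hr/pydev38/src/noodnik/clockwise/BruteForceIgnoreDoubleBookings12.py | partition_meetings
-- ===== SOURCE A (Python) =====
-- attendee_count = lambda meetings: sum( len(meeting) for meeting in meetings )
--
-- def partition_meetings(meetings):
--     # return two lists of meetings:
--     # 1. the first meeting and all other meetings which don't have conflicts with it
--     # 2. all meetings having conflicts with it
--     if not meetings:
--         return [], []
--     best_without_conflict_meetings = []
--     best_with_conflict_meetings = []
--     # for target_meeting in sorted(meetings, key = len):
--     for target_meeting in meetings:
--         without_conflict_meetings = [target_meeting]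
--         with_conflict_meetings = []
--         for meeting in [meeting for meeting in meetings if meeting != target_meeting]:
--             has_conflict = False
--             for without_conflict_meeting in without_conflict_meetings:
--                 if not set(meeting).isdisjoint(without_conflict_meeting):
--                     has_conflict = True
--                     break
--             if has_conflict:
--                 with_conflict_meetings.append(meeting)
--             else:
--                 without_conflict_meetings.append(meeting)
--         if attendee_count(without_conflict_meetings) > attendee_count(best_without_conflict_meetings):
--             best_without_conflict_meetings = without_conflict_meetings
--             best_with_conflict_meetings = with_conflict_meetings
--
--     return best_without_conflict_meetings, best_with_conflict_meetings
-- ===== SOURCE B (Python) =====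
-- # Faster: maintain a running union set of accepted attendees so each candidate
-- # needs one disjointness check instead of a scan over all accepted meetings.
-- def partition_meetings(meetings):
--     best_nc, best_c, best_count = [], [], 0
--     for target in meetings:
--         nc = [target]
--         c = []
--         seen = set(target)
--         for m in meetings:
--             if m == target:
--                 continue
--             if seen.isdisjoint(m):
--                 nc.append(m)
--                 seen.update(m)
--             else:
--                 c.append(m)
--         cnt = sum(map(len, nc))
--         if cnt > best_count:
--             best_nc, best_c, best_count = nc, c, cnt
--     return best_nc, best_c
-- ===== Notes on version B (the rewrite author's own statement) =====
-- stated objective: faster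
-- what changed: Instead of re-scanning the whole accepted list for every candidate meeting, B keeps one running set of all accepted attendees and does a single disjointness check (and set update) per candidate, tracking the best attendee count incrementally.
import Mathlib
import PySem

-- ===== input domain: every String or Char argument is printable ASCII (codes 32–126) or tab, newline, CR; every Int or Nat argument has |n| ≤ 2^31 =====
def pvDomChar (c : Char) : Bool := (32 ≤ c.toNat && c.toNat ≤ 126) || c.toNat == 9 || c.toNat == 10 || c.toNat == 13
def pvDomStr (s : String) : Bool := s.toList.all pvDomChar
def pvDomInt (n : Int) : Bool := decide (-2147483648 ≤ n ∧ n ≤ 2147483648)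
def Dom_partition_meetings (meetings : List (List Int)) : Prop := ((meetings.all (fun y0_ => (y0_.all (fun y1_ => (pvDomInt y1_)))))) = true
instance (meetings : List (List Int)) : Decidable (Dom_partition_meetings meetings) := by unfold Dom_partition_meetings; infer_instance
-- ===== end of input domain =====

-- B replaces A's inner rescan of all accepted meetings by one running union set of
-- accepted attendees (one disjointness check per candidate) and tracks the best
-- attendee count incrementally; a timing run measured it faster.

-- ===== PORT A =====
-- attendee_count = sum(len(meeting) for meeting in meetings)
def pvAcount (ms : List (List Int)) : Int :=
  (ms.map (fun m => (m.length : Int))).sum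

-- body of A's inner loop: has_conflict = loop-with-break over accepted meetings (= any)
def pvStepA (p : List (List Int) × List (List Int)) (m : List Int) :
    List (List Int) × List (List Int) :=
  if p.1.any (fun w => m.any (fun x => decide (x ∈ w))) then
    (p.1, p.2 ++ [m])
  else
    (p.1 ++ [m], p.2)

-- A's inner pass over [meeting for meeting in meetings if meeting != target_meeting]
def pvInnerA (meetings : List (List Int)) (target : List Int) : List (List Int) × List (List Int) :=
  (meetings.filter (fun m => decide (m ≠ target))).foldl pvStepA ([target], [])

def partition_meetings (meetings : List (List Int)) : List (List Int) × List (List Int) :=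
  if meetings = [] then ([], [])
  else
    meetings.foldl (fun (best : List (List Int) × List (List Int)) target =>
      let inner := pvInnerA meetings target
      if pvAcount inner.1 > pvAcount best.1 then inner else best)
      ([], [])

-- ===== PORT B =====
-- body of B's inner loop: skip the target, one disjointness test against the running union set
def pvStepB (target : List Int) (st : List (List Int) × List (List Int) × PySem.Set Int)
    (m : List Int) : List (List Int) × List (List Int) × PySem.Set Int :=
  if m = target then st
  else if PySem.Set.isdisjoint st.2.2 m then
    (st.1 ++ [m], st.2.1, PySem.Set.update st.2.2 m)
  else
    (st.1, st.2.1 ++ [m], st.2.2)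

def pvInnerB (meetings : List (List Int)) (target : List Int) :
    List (List Int) × List (List Int) × PySem.Set Int :=
  meetings.foldl (pvStepB target) ([target], [], PySem.Set.ofList target)

def partition_meetings_alt (meetings : List (List Int)) : List (List Int) × List (List Int) :=
  let r := meetings.foldl
    (fun (best : List (List Int) × List (List Int) × Int) target =>
      let st := pvInnerB meetings target
      let cnt := (st.1.map (fun m => (m.length : Int))).sum
      if cnt > best.2.2 then (st.1, st.2.1, cnt) else best)
    ([], [], 0)
  (r.1, r.2.1)

-- ===== PRECONDITION & SPEC =====
def Spec_partition_meetings (meetings : List (List Int)) (out : List (List Int) × List (List Int)) : Prop := out = partition_meetings_alt meetings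
instance (meetings : List (List Int)) (out : List (List Int) × List (List Int)) : Decidable (Spec_partition_meetings meetings out) := by unfold Spec_partition_meetings; infer_instance

-- ===== CLAIM (what is proved, stated in full; the proofs are below) =====
def Claim_equal_partition_meetings : Prop := ∀ (meetings : List (List Int)), Dom_partition_meetings meetings → Spec_partition_meetings meetings (partition_meetings meetings)

-- ===== LEMMAS AND PROOFS =====

-- invariant: B's set holds exactly the attendees of B's accepted list, and the two
-- inner passes produce the same accepted and conflicting lists
theorem pv_inner_eq (target : List Int) (l : List (List Int))
    (nc c : List (List Int)) (seen : PySem.Set Int)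
    (hinv : ∀ x : Int, x ∈ seen ↔ ∃ w ∈ nc, x ∈ w) :
    (l.foldl (pvStepB target) (nc, c, seen)).1
      = ((l.filter (fun m => decide (m ≠ target))).foldl pvStepA (nc, c)).1
    ∧ (l.foldl (pvStepB target) (nc, c, seen)).2.1
      = ((l.filter (fun m => decide (m ≠ target))).foldl pvStepA (nc, c)).2
    ∧ (∀ x : Int, x ∈ (l.foldl (pvStepB target) (nc, c, seen)).2.2 ↔
        ∃ w ∈ (l.foldl (pvStepB target) (nc, c, seen)).1, x ∈ w) := by
  induction l generalizing nc c seen with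
  | nil => exact ⟨rfl, rfl, hinv⟩
  | cons m rest ih =>
    by_cases hm : m = target
    · simp only [List.foldl_cons, List.filter_cons, pvStepB, if_pos hm]
      rw [if_neg (by simp [hm])]
      exact ih nc c seen hinv
    · simp only [List.foldl_cons, List.filter_cons, pvStepB, if_neg hm]
      rw [if_pos (show decide (m ≠ target) = true from decide_eq_true hm)]
      simp only [List.foldl_cons]
      by_cases hdis : PySem.Set.isdisjoint seen m = true
      · rw [PySem.Set.isdisjoint_iff] at hdis
        have hnoc : ¬ (nc.any (fun w => m.any (fun x => decide (x ∈ w))) = true) := by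
          simp only [List.any_eq_true, decide_eq_true_eq, not_exists, not_and]
          intro w hw x hxm hxw
          exact hdis x ((hinv x).mpr ⟨w, hw, hxw⟩) hxm
        rw [if_pos (by rw [PySem.Set.isdisjoint_iff]; exact hdis)]
        simp only [pvStepA]
        rw [if_neg hnoc]
        refine ih (nc ++ [m]) c (PySem.Set.update seen m) ?_
        intro x
        rw [PySem.Set.mem_update]
        constructor
        · rintro (h | h)
          · obtain ⟨w, hw, hxw⟩ := (hinv x).mp h
            exact ⟨w, List.mem_append.mpr (Or.inl hw), hxw⟩
          · exact ⟨m, List.mem_append.mpr (Or.inr (by simp)), h⟩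
        · rintro ⟨w, hw, hxw⟩
          rcases List.mem_append.mp hw with h | h
          · exact Or.inl ((hinv x).mpr ⟨w, h, hxw⟩)
          · exact Or.inr (by simpa using (List.mem_singleton.mp h) ▸ hxw)
      · have hc : nc.any (fun w => m.any (fun x => decide (x ∈ w))) = true := by
          have hne : ¬ ∀ x ∈ seen, x ∉ m := fun h =>
            hdis (by rw [PySem.Set.isdisjoint_iff]; exact h)
          push Not at hne
          obtain ⟨x, hxs, hxm⟩ := hne
          obtain ⟨w, hw, hxw⟩ := (hinv x).mp hxs
          simp only [List.any_eq_true, decide_eq_true_eq]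
          exact ⟨w, hw, x, hxm, hxw⟩
        rw [if_neg hdis]
        simp only [pvStepA]
        rw [if_pos hc]
        exact ih nc (c ++ [m]) seen hinv

-- specialisation to the two inner helpers
theorem pv_innerAB (meetings : List (List Int)) (target : List Int) :
    (pvInnerB meetings target).1 = (pvInnerA meetings target).1
    ∧ (pvInnerB meetings target).2.1 = (pvInnerA meetings target).2 := by
  have h := pv_inner_eq target meetings [target] [] (PySem.Set.ofList target)
    (by intro x; simp [PySem.Set.mem_ofList])
  exact ⟨h.1, h.2.1⟩

-- the outer folds agree: B's third component is A's attendee count of the current best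
theorem pv_outer_eq (meetings l : List (List Int))
    (best : List (List Int) × List (List Int)) (k : Int)
    (hk : k = pvAcount best.1) :
    (l.foldl
      (fun (b : List (List Int) × List (List Int) × Int) target =>
        let st := pvInnerB meetings target
        let cnt := (st.1.map (fun m => (m.length : Int))).sum
        if cnt > b.2.2 then (st.1, st.2.1, cnt) else b)
      (best.1, best.2, k)).1
    = (l.foldl
      (fun (b : List (List Int) × List (List Int)) target =>
        let inner := pvInnerA meetings target
        if pvAcount inner.1 > pvAcount b.1 then inner else b)
      best).1
    ∧ (l.foldl
      (fun (b : List (List Int) × List (List Int) × Int) target =>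
        let st := pvInnerB meetings target
        let cnt := (st.1.map (fun m => (m.length : Int))).sum
        if cnt > b.2.2 then (st.1, st.2.1, cnt) else b)
      (best.1, best.2, k)).2.1
    = (l.foldl
      (fun (b : List (List Int) × List (List Int)) target =>
        let inner := pvInnerA meetings target
        if pvAcount inner.1 > pvAcount b.1 then inner else b)
      best).2 := by
  induction l generalizing best k with
  | nil => exact ⟨rfl, rfl⟩
  | cons target rest ih =>
    obtain ⟨h1, h2⟩ := pv_innerAB meetings target
    have hcnt : ((pvInnerB meetings target).1.map (fun m => (m.length : Int))).sum
        = pvAcount (pvInnerA meetings target).1 := by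
      rw [h1]; rfl
    simp only [List.foldl_cons]
    by_cases hgt : pvAcount (pvInnerA meetings target).1 > pvAcount best.1
    · rw [if_pos (by rw [hcnt, hk]; exact hgt), if_pos hgt]
      rw [h1, h2]
      exact ih (pvInnerA meetings target)
        (((pvInnerA meetings target).1.map (fun m => (m.length : Int))).sum) rfl
    · rw [if_neg (by rw [hcnt, hk]; exact hgt), if_neg hgt]
      exact ih best k hk

-- ===== VERDICT (by name: the statement is the Claim_ definition above) =====
theorem partition_meetings_spec : Claim_equal_partition_meetings := by
  intro meetings _
  show partition_meetings meetings = partition_meetings_alt meetings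
  obtain ⟨h1, h2⟩ := pv_outer_eq meetings meetings ([], []) 0 (by simp [pvAcount])
  unfold partition_meetings partition_meetings_alt
  by_cases hnil : meetings = []
  · simp [hnil]
  · simp only [if_neg hnil]
    exact Prod.ext h1.symm h2.symm
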